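-- pv_equiv track=rewrite | github.com/LeeJeongHwi/Today_Algo | 프로그래머스/level1/level1_부족한금액계산하기.py | solution
-- ===== SOURCE A (Python) =====
-- def solution(price, money, count):
--     p = 0
--     for c in range(1, count+1):
--         p += (price*c)
--
--     if money - p < 0:
--         return p - money
--     else:
--         return 0
-- ===== SOURCE B (Python) =====
-- def solution(price, money, count):
--     n = count if count > 0 else 0
--     shortage = price * n * (n + 1) // 2 - money
--     return shortage if shortage > 0 else 0
-- ===== Notes on version B (the rewrite author's own statement) =====
-- stated objective: faster
-- what changed: Replaces the O(count) summation loop with the closed-form arithmetic series price*n*(n+1)//2.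
import Mathlib
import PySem

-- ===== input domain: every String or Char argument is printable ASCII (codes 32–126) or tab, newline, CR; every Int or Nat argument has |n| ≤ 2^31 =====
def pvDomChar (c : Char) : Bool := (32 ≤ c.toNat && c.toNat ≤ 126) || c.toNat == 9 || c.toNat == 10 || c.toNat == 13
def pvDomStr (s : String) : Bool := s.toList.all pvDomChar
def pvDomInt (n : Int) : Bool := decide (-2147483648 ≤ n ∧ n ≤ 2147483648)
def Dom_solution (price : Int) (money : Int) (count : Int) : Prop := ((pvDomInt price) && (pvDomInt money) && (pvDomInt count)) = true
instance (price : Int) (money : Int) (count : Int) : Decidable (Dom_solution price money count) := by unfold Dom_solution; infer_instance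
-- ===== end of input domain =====

-- B replaces A's O(count) summation loop with the closed-form arithmetic series (objective: faster).
-- ===== PORT A =====
def solution (price : Int) (money : Int) (count : Int) : Int :=
  let p := (PySem.List.pyRange 1 (count + 1) 1).foldl (fun p c => p + price * c) 0
  if money - p < 0 then p - money else 0

-- ===== PORT B =====
def solution_alt (price : Int) (money : Int) (count : Int) : Int :=
  let n : Int := if count > 0 then count else 0
  let shortage := PySem.Int.floordiv (price * n * (n + 1)) 2 - money
  if shortage > 0 then shortage else 0

-- ===== PRECONDITION & SPEC =====
def Spec_solution (price : Int) (money : Int) (count : Int) (out : Int) : Prop := out = solution_alt price money count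
instance (price : Int) (money : Int) (count : Int) (out : Int) : Decidable (Spec_solution price money count out) := by unfold Spec_solution; infer_instance

-- ===== CLAIM (what is proved, stated in full; the proofs are below) =====
def Claim_equal_solution : Prop := ∀ (price : Int) (money : Int) (count : Int), Dom_solution price money count → Spec_solution price money count (solution price money count)

-- ===== LEMMAS AND PROOFS =====

-- sum 1..n of price*c, via the right-append recursion of pyRange
theorem pv_sum_range (price : Int) (n : Nat) :
    (PySem.List.pyRange 1 ((n : Int) + 1) 1).foldl (fun p c => p + price * c) 0
      = PySem.Int.floordiv (price * n * (n + 1)) 2 := by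
  induction n with
  | zero => simp [PySem.List.pyRange, PySem.Int.floordiv]
  | succ k ih =>
    have h : PySem.List.pyRange 1 ((k + 1 : Nat) : Int) 1 ++ [((k + 1 : Nat) : Int)]
        = PySem.List.pyRange 1 (((k + 1 : Nat) : Int) + 1) 1 := by
      have := PySem.List.pyRange_one_succ_right (a := 1) (b := ((k + 1 : Nat) : Int)) (by push_cast; omega)
      simpa using this.symm
    rw [← h, List.foldl_append]
    push_cast
    push_cast at ih
    rw [ih]
    simp only [List.foldl]
    rw [PySem.Int.floordiv_eq_ediv_of_pos (by omega), PySem.Int.floordiv_eq_ediv_of_pos (by omega)]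
    have hk : (2 : Int) ∣ price * k * (k + 1) := by
      rcases Int.even_or_odd (k : Int) with ⟨m, hm⟩ | ⟨m, hm⟩
      · exact ⟨price * m * (k + 1), by rw [hm]; ring⟩
      · exact ⟨price * k * (m + 1), by rw [hm]; ring⟩
    have hk2 : (2 : Int) ∣ price * (k + 1) * (k + 1 + 1) := by
      rcases Int.even_or_odd (k : Int) with ⟨m, hm⟩ | ⟨m, hm⟩
      · exact ⟨price * (k + 1) * (m + 1), by rw [hm]; ring⟩
      · exact ⟨price * (m + 1) * (k + 2), by rw [hm]; ring⟩
    obtain ⟨q, hq⟩ := hk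
    obtain ⟨q2, hq2⟩ := hk2
    rw [hq, hq2, Int.mul_ediv_cancel_left _ (by norm_num), Int.mul_ediv_cancel_left _ (by norm_num)]
    nlinarith [hq, hq2]

theorem pv_main (price money count : Int) : solution price money count = solution_alt price money count := by
  unfold solution solution_alt
  by_cases hc : count > 0
  · obtain ⟨n, rfl⟩ : ∃ n : Nat, count = (n : Int) := ⟨count.toNat, by omega⟩
    rw [pv_sum_range]
    simp only [hc, if_pos]
    split <;> split <;> omega
  · have hempty : PySem.List.pyRange 1 (count + 1) 1 = [] := by
      simp only [PySem.List.pyRange_one]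
      have h0 : ((count + 1 - 1).toNat) = 0 := by omega
      rw [h0]
      simp
    rw [hempty]
    simp only [List.foldl_nil, if_neg hc]
    have : PySem.Int.floordiv (price * 0 * (0 + 1)) 2 = 0 := by
      simp [PySem.Int.floordiv]
    rw [this]
    split <;> split <;> omega

-- ===== VERDICT =====
theorem solution_spec : Claim_equal_solution := by
  intro price money count _
  unfold Spec_solution
  exact pv_main price money count
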